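-- pv_equiv track=rewrite | github.com/Ing-Josef-Klotzner/python | 2017/hackerrank/squareTenTree.py | solve
-- ===== SOURCE A (Python) =====
-- def solve (l, r, k, num_digits):
--     if k == 0:
--         return [(0, r - l + 1)]
--     step = int ('1' + '0' * (num_digits [k] - 1))
--     k_left = 0 if l == 0 else ((l - 1) // step + 1) * step
--     k_right = (r + 1) // step * step - 1
--     res = []
--     if k_left > k_right:
--         return solve (l, r, k - 1, num_digits)
--     if k_left != l:
--         res += solve (l, min (k_left - 1, r), k - 1, num_digits)
--     if k_left < k_right:
--         res += [(k, (k_right + 1 - k_left) // step)]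
--     if k_right != r:
--         res += solve (max (l, k_right + 1), r, k - 1, num_digits)
--     return res
-- ===== SOURCE B (Python) =====
-- def solve(l, r, k, num_digits):
--     # Block-index arithmetic with a prepend accumulator: recurse right-to-left,
--     # building the output back-to-front; fringes detected by divisibility tests.
--     return _go(l, r, k, num_digits, [])
--
-- def _go(l, r, k, nd, acc):
--     # prepends the decomposition of [l, r] at level k in front of acc
--     if k == 0:
--         return [(0, r - l + 1)] + acc
--     step = 10 ** max(nd[k] - 1, 0)
--     a, b = -(-l // step), (r + 1) // step   # ceil(l/step), floor((r+1)/step)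
--     if a >= b:
--         return _go(l, r, k - 1, nd, acc)
--     if (r + 1) % step:
--         acc = _go(b * step, r, k - 1, nd, acc)
--     if (b - a) * step > 1:
--         acc = [(k, b - a)] + acc
--     if l % step:
--         acc = _go(l, a * step - 1, k - 1, nd, acc)
--     return acc
-- ===== Notes on version B (the rewrite author's own statement) =====
-- stated objective: alternative
-- what changed: Replaces A's position arithmetic (k_left/k_right with min/max, an l==0 special case, and a step built by parsing the string '1'+'0'*(d-1)) by block-index arithmetic (ceil/floor quotients, divisibility tests for the fringes, count = b-a, step = 10**max(d-1,0)) and builds the output back-to-front with a prepend accumulator, recursing on the right fringe first; Pre_ keeps k=0, 0<k<len, and the negative-k inputs (-len<=k<0, l<=r, num_digits[0]<=1) guaranteed to return, excluding k>=len / k<-len (IndexError) and the remaining negative-k inputs whose termination has no closed form.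
-- outside the precondition, e.g. on solve(24, 24, -1, [2, 4, 1, -4, 3]): A returns [], B returns []; on solve(3, 95, 4, [1, 2]): A raises IndexError, B raises IndexError; on solve(10, 5, -1, [0, 1]): A raises IndexError, B raises IndexError
import Mathlib
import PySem

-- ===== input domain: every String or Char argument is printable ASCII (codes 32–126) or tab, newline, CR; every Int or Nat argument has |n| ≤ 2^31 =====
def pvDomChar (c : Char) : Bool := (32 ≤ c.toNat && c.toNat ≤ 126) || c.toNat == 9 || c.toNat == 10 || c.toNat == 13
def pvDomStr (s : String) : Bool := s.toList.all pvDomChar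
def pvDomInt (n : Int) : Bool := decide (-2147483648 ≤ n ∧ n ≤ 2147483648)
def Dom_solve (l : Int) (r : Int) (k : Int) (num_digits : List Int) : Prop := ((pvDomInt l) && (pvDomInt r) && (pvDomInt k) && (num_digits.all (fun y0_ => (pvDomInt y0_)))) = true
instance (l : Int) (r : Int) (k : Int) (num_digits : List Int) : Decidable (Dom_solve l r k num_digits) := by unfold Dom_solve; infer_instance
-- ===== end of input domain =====

-- B replaces A's position arithmetic by block-index arithmetic (ceil/floor quotients,
-- divisibility tests) and builds the output back-to-front with a prepend accumulator.

-- ===== PORT A =====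
-- Literal port of A's recursion; the fuel argument (= k.toNat + len(nd) + 1 at the top
-- call) only totalizes the recursion: inside Pre_solve it never runs out (each level
-- decreases k by 1 and the recursion stops at k = 0, resp. at k = -len for negative k).
-- step = int('1' + '0'*(num_digits[k]-1)) = 10^((num_digits[k]-1).toNat) ('0'*neg = '').
def goA (nd : List Int) : Nat → Int → Int → Int → List (Int × Int)
  | fuel, l, r, k =>
    if k = 0 then [(0, r - l + 1)]
    else match fuel with
      | 0 => []   -- unreachable inside Pre_solve
      | f + 1 =>
        let step : Int := (10 : Int) ^ (PySem.List.pyGetD nd k 0 - 1).toNat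
        let k_left : Int := if l = 0 then 0 else (PySem.Int.floordiv (l - 1) step + 1) * step
        let k_right : Int := PySem.Int.floordiv (r + 1) step * step - 1
        if k_left > k_right then goA nd f l r (k - 1)
        else
          (if k_left ≠ l then goA nd f l (min (k_left - 1) r) (k - 1) else [])
          ++ (if k_left < k_right then [(k, PySem.Int.floordiv (k_right + 1 - k_left) step)] else [])
          ++ (if k_right ≠ r then goA nd f (max l (k_right + 1)) r (k - 1) else [])

def solve (l : Int) (r : Int) (k : Int) (num_digits : List Int) : List (Int × Int) :=
  goA num_digits (k.toNat + num_digits.length + 1) l r k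

-- ===== PORT B =====
-- Source B's _go: prepends the decomposition of [l, r] at level k in front of acc,
-- right fringe first; same fuel totalization as port A.
def goB (nd : List Int) : Nat → Int → Int → Int → List (Int × Int) → List (Int × Int)
  | fuel, l, r, k, acc =>
    if k = 0 then (0, r - l + 1) :: acc
    else match fuel with
      | 0 => acc   -- unreachable inside Pre_solve
      | f + 1 =>
        let step : Int := (10 : Int) ^ (max (PySem.List.pyGetD nd k 0 - 1) 0).toNat
        let a : Int := -(PySem.Int.floordiv (-l) step)
        let b : Int := PySem.Int.floordiv (r + 1) step
        if a ≥ b then goB nd f l r (k - 1) acc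
        else
          let acc1 := if PySem.Int.mod (r + 1) step ≠ 0 then goB nd f (b * step) r (k - 1) acc else acc
          let acc2 := if (b - a) * step > 1 then (k, b - a) :: acc1 else acc1
          if PySem.Int.mod l step ≠ 0 then goB nd f l (a * step - 1) (k - 1) acc2 else acc2

def solve_alt (l : Int) (r : Int) (k : Int) (num_digits : List Int) : List (Int × Int) :=
  goB num_digits (k.toNat + num_digits.length + 1) l r k []

-- ===== PRECONDITION & SPEC =====
-- Pre_solve: k = 0 always returns at once; for 0 < k < len(num_digits) every level's index is valid
-- and the recursion bottoms out at k = 0; for -len <= k < 0 (Python's negative-index wraparound) A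
-- returns whenever l <= r and num_digits[0] <= 1, because every chain then stops at k = -len at the
-- latest. Excluded: k >= len (IndexError), k < -len (IndexError at the first lookup), and the remaining
-- negative-k inputs, where whether A returns or raises IndexError/RecursionError depends on the data
-- with no closed form; where A does return there, B returns the same value (see cites).
def Pre_solve (l : Int) (r : Int) (k : Int) (num_digits : List Int) : Prop :=
  k = 0 ∨ (0 < k ∧ k < num_digits.length)
    ∨ (-num_digits.length ≤ k ∧ k < 0 ∧ l ≤ r ∧ num_digits.headI ≤ 1)
instance (l : Int) (r : Int) (k : Int) (num_digits : List Int) : Decidable (Pre_solve l r k num_digits) := by unfold Pre_solve; infer_instance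
def pvWitness_solve : Int × Int × Int × List Int := (3, 95, 2, [0, 1, 2])

def Spec_solve (l : Int) (r : Int) (k : Int) (num_digits : List Int) (out : List (Int × Int)) : Prop := out = solve_alt l r k num_digits
instance (l : Int) (r : Int) (k : Int) (num_digits : List Int) (out : List (Int × Int)) : Decidable (Spec_solve l r k num_digits out) := by unfold Spec_solve; infer_instance

-- ===== CLAIM (what is proved, stated in full; the proofs are below) =====
def Claim_equal_solve : Prop := ∀ (l : Int) (r : Int) (k : Int) (num_digits : List Int), Dom_solve l r k num_digits → Pre_solve l r k num_digits → Spec_solve l r k num_digits (solve l r k num_digits)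

-- ===== LEMMAS AND PROOFS =====

-- unfolding equations (rfl; stated with the lets zeta-expanded)
lemma goA_succ (nd : List Int) (f : Nat) (l r k : Int) :
    goA nd (f + 1) l r k =
      (if k = 0 then [(0, r - l + 1)]
       else
        (if (if l = 0 then (0 : Int) else (PySem.Int.floordiv (l - 1) ((10 : Int) ^ (PySem.List.pyGetD nd k 0 - 1).toNat) + 1) * ((10 : Int) ^ (PySem.List.pyGetD nd k 0 - 1).toNat)) > PySem.Int.floordiv (r + 1) ((10 : Int) ^ (PySem.List.pyGetD nd k 0 - 1).toNat) * ((10 : Int) ^ (PySem.List.pyGetD nd k 0 - 1).toNat) - 1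
         then goA nd f l r (k - 1)
         else
          (if (if l = 0 then (0 : Int) else (PySem.Int.floordiv (l - 1) ((10 : Int) ^ (PySem.List.pyGetD nd k 0 - 1).toNat) + 1) * ((10 : Int) ^ (PySem.List.pyGetD nd k 0 - 1).toNat)) ≠ l then goA nd f l (min ((if l = 0 then (0 : Int) else (PySem.Int.floordiv (l - 1) ((10 : Int) ^ (PySem.List.pyGetD nd k 0 - 1).toNat) + 1) * ((10 : Int) ^ (PySem.List.pyGetD nd k 0 - 1).toNat)) - 1) r) (k - 1) else [])
          ++ (if (if l = 0 then (0 : Int) else (PySem.Int.floordiv (l - 1) ((10 : Int) ^ (PySem.List.pyGetD nd k 0 - 1).toNat) + 1) * ((10 : Int) ^ (PySem.List.pyGetD nd k 0 - 1).toNat)) < PySem.Int.floordiv (r + 1) ((10 : Int) ^ (PySem.List.pyGetD nd k 0 - 1).toNat) * ((10 : Int) ^ (PySem.List.pyGetD nd k 0 - 1).toNat) - 1 then [(k, PySem.Int.floordiv (PySem.Int.floordiv (r + 1) ((10 : Int) ^ (PySem.List.pyGetD nd k 0 - 1).toNat) * ((10 : Int) ^ (PySem.List.pyGetD nd k 0 -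 1).toNat) - 1 + 1 - (if l = 0 then (0 : Int) else (PySem.Int.floordiv (l - 1) ((10 : Int) ^ (PySem.List.pyGetD nd k 0 - 1).toNat) + 1) * ((10 : Int) ^ (PySem.List.pyGetD nd k 0 - 1).toNat))) ((10 : Int) ^ (PySem.List.pyGetD nd k 0 - 1).toNat))] else [])
          ++ (if PySem.Int.floordiv (r + 1) ((10 : Int) ^ (PySem.List.pyGetD nd k 0 - 1).toNat) * ((10 : Int) ^ (PySem.List.pyGetD nd k 0 - 1).toNat) - 1 ≠ r then goA nd f (max l (PySem.Int.floordiv (r + 1) ((10 : Int) ^ (PySem.List.pyGetD nd k 0 - 1).toNat) * ((10 : Int) ^ (PySem.List.pyGetD nd k 0 - 1).toNat) - 1 + 1)) r (k - 1) else []))) := rfl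

lemma goB_succ (nd : List Int) (f : Nat) (l r k : Int) (acc : List (Int × Int)) :
    goB nd (f + 1) l r k acc =
      (if k = 0 then (0, r - l + 1) :: acc
       else
        if -(PySem.Int.floordiv (-l) ((10 : Int) ^ (max (PySem.List.pyGetD nd k 0 - 1) 0).toNat)) ≥ PySem.Int.floordiv (r + 1) ((10 : Int) ^ (max (PySem.List.pyGetD nd k 0 - 1) 0).toNat)
        then goB nd f l r (k - 1) acc
        else
          if PySem.Int.mod l ((10 : Int) ^ (max (PySem.List.pyGetD nd k 0 - 1) 0).toNat) ≠ 0
          then goB nd f l (-(PySem.Int.floordiv (-l) ((10 : Int) ^ (max (PySem.List.pyGetD nd k 0 - 1) 0).toNat)) * ((10 : Int) ^ (max (PySem.List.pyGetD nd k 0 - 1) 0).toNat) - 1) (k - 1)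
            (if (PySem.Int.floordiv (r + 1) ((10 : Int) ^ (max (PySem.List.pyGetD nd k 0 - 1) 0).toNat) - -(PySem.Int.floordiv (-l) ((10 : Int) ^ (max (PySem.List.pyGetD nd k 0 - 1) 0).toNat))) * ((10 : Int) ^ (max (PySem.List.pyGetD nd k 0 - 1) 0).toNat) > 1
             then (k, PySem.Int.floordiv (r + 1) ((10 : Int) ^ (max (PySem.List.pyGetD nd k 0 - 1) 0).toNat) - -(PySem.Int.floordiv (-l) ((10 : Int) ^ (max (PySem.List.pyGetD nd k 0 - 1) 0).toNat))) :: (if PySem.Int.mod (r + 1) ((10 : Int) ^ (max (PySem.List.pyGetD nd k 0 - 1) 0).toNat) ≠ 0 then goB nd f (PySem.Int.floordiv (r + 1) ((10 : Int) ^ (max (PySem.List.pyGetD nd k 0 - 1) 0).toNat) * ((10 : Int) ^ (max (PySem.List.pyGetD nd k 0 - 1) 0).toNat)) r (k - 1) acc else acc)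
             else (if PySem.Int.mod (r + 1) ((10 : Int) ^ (max (PySem.List.pyGetD nd k 0 - 1) 0).toNat) ≠ 0 then goB nd f (PySem.Int.floordiv (r + 1) ((10 : Int) ^ (max (PySem.List.pyGetD nd k 0 - 1) 0).toNat) * ((10 : Int) ^ (max (PySem.List.pyGetD nd k 0 - 1) 0).toNat)) r (k - 1) acc else acc))
          else
            (if (PySem.Int.floordiv (r + 1) ((10 : Int) ^ (max (PySem.List.pyGetD nd k 0 - 1) 0).toNat) - -(PySem.Int.floordiv (-l) ((10 : Int) ^ (max (PySem.List.pyGetD nd k 0 - 1) 0).toNat))) * ((10 : Int) ^ (max (PySem.List.pyGetD nd k 0 - 1) 0).toNat) > 1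
             then (k, PySem.Int.floordiv (r + 1) ((10 : Int) ^ (max (PySem.List.pyGetD nd k 0 - 1) 0).toNat) - -(PySem.Int.floordiv (-l) ((10 : Int) ^ (max (PySem.List.pyGetD nd k 0 - 1) 0).toNat))) :: (if PySem.Int.mod (r + 1) ((10 : Int) ^ (max (PySem.List.pyGetD nd k 0 - 1) 0).toNat) ≠ 0 then goB nd f (PySem.Int.floordiv (r + 1) ((10 : Int) ^ (max (PySem.List.pyGetD nd k 0 - 1) 0).toNat) * ((10 : Int) ^ (max (PySem.List.pyGetD nd k 0 - 1) 0).toNat)) r (k - 1) acc else acc)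
             else (if PySem.Int.mod (r + 1) ((10 : Int) ^ (max (PySem.List.pyGetD nd k 0 - 1) 0).toNat) ≠ 0 then goB nd f (PySem.Int.floordiv (r + 1) ((10 : Int) ^ (max (PySem.List.pyGetD nd k 0 - 1) 0).toNat) * ((10 : Int) ^ (max (PySem.List.pyGetD nd k 0 - 1) 0).toNat)) r (k - 1) acc else acc))) := rfl

-- The bridge: for every fuel, B's accumulator recursion prepends exactly A's result.
lemma goB_eq_goA (nd : List Int) : ∀ (fuel : Nat) (l r k : Int) (acc : List (Int × Int)),
    goB nd fuel l r k acc = goA nd fuel l r k ++ acc := by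
  intro fuel
  induction fuel with
  | zero =>
    intro l r k acc
    rw [goB.eq_1, goA.eq_1]
    split_ifs <;> rfl
  | succ f ih =>
    intro l r k acc
    rw [goB_succ, goA_succ]
    by_cases hk : k = 0
    · simp [hk]
    rw [if_neg hk, if_neg hk]
    have hmax : (max (PySem.List.pyGetD nd k 0 - 1) 0).toNat = (PySem.List.pyGetD nd k 0 - 1).toNat := by omega
    rw [hmax]
    set e : Nat := (PySem.List.pyGetD nd k 0 - 1).toNat with he
    set s : Int := (10 : Int) ^ e with hs
    have hs0 : 0 < s := by positivity
    set a : Int := -(PySem.Int.floordiv (-l) s) with ha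
    set b : Int := PySem.Int.floordiv (r + 1) s with hb
    have hmn := PySem.Int.mod_nonneg
    have hml := PySem.Int.mod_lt
    have hbq : b * s + PySem.Int.mod (r + 1) s = r + 1 := by
      rw [hb]; exact PySem.Int.floordiv_mul_add_mod (r + 1) s
    have haq : -a * s + PySem.Int.mod (-l) s = -l := by
      rw [ha, neg_neg]; exact PySem.Int.floordiv_mul_add_mod (-l) s
    have hlq := PySem.Int.floordiv_mul_add_mod (l - 1) s
    have hceil : a = PySem.Int.floordiv (l - 1) s + 1 := by
      rw [ha]
      have h2 := hmn (-l) hs0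
      have h3 := hml (-l) hs0
      have h5 := hmn (l - 1) hs0
      have h6 := hml (l - 1) hs0
      nlinarith
    have hkl : (if l = 0 then (0 : Int) else (PySem.Int.floordiv (l - 1) s + 1) * s) = a * s := by
      by_cases hl : l = 0
      · subst hl
        simp [ha, PySem.Int.floordiv_eq_ediv_of_pos hs0]
      · rw [if_neg hl, hceil]
    have hbl : b * s ≤ r + 1 := by
      have h2 := hmn (r + 1) hs0
      omega
    have hbr : r + 1 < (b + 1) * s := by
      have h3 := hml (r + 1) hs0
      nlinarith
    have hal : l ≤ a * s := by
      have h2 := hmn (-l) hs0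
      rw [ha]; nlinarith
    have har : (a - 1) * s < l := by
      have h3 := hml (-l) hs0
      rw [ha]; nlinarith
    rw [hkl]
    by_cases hab : a ≥ b
    · have hgt : a * s > b * s - 1 := by nlinarith
      rw [if_pos hab, if_pos hgt, ih]
    · have hab' : a < b := by omega
      have hngt : ¬ (a * s > b * s - 1) := by push_neg; nlinarith
      rw [if_neg (by omega), if_neg hngt]
      have hLl : (a * s ≠ l) ↔ PySem.Int.mod l s ≠ 0 := by
        have h1 := PySem.Int.floordiv_mul_add_mod l s
        have h2 := hmn l hs0
        have h3 := hml l hs0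
        have hub : PySem.Int.floordiv l s ≤ a := by
          have hmul : PySem.Int.floordiv l s * s ≤ a * s := by linarith
          exact le_of_mul_le_mul_right hmul hs0
        have hlb : a - 1 ≤ PySem.Int.floordiv l s := by
          have hr : (PySem.Int.floordiv l s + 1) * s = PySem.Int.floordiv l s * s + s := by ring
          have hmul : (a - 1) * s < (PySem.Int.floordiv l s + 1) * s := by linarith
          have := lt_of_mul_lt_mul_right hmul (le_of_lt hs0)
          omega
        have hfd : PySem.Int.floordiv l s = a - 1 ∨ PySem.Int.floordiv l s = a := by omega
        constructor
        · intro h hm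
          rcases hfd with h4 | h4 <;> rw [h4] at h1 <;> [linarith; exact h (by omega)]
        · intro hm h
          rcases hfd with h4 | h4 <;> rw [h4] at h1
          · have hr : (a - 1) * s = a * s - s := by ring
            omega
          · omega
      have hRr : (b * s - 1 ≠ r) ↔ PySem.Int.mod (r + 1) s ≠ 0 := by
        omega
      have hmid : (a * s < b * s - 1) ↔ (b - a) * s > 1 := by
        have hexp : (b - a) * s = b * s - a * s := by ring
        constructor <;> intro h <;> linarith
      have hmin : min (a * s - 1) r = a * s - 1 := by
        have : (a + 1) * s ≤ b * s := by nlinarith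
        omega
      have hmax' : max l (b * s - 1 + 1) = b * s := by
        have : a * s < b * s := by nlinarith
        omega
      have hcount : PySem.Int.floordiv (b * s - 1 + 1 - a * s) s = b - a := by
        rw [show b * s - 1 + 1 - a * s = (b - a) * s from by ring,
            PySem.Int.floordiv_eq_ediv_of_pos hs0, Int.mul_ediv_cancel _ (by omega)]
      rw [hmin, hmax', hcount]
      simp only [hLl, hRr, hmid]
      split_ifs <;> simp [ih, List.append_assoc]

-- ===== VERDICT (by name: the statement is the Claim_ definition above) =====
theorem solve_spec : Claim_equal_solve := by
  intro l r k nd _ _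
  unfold Spec_solve solve solve_alt
  rw [goB_eq_goA, List.append_nil]
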